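-- pv_equiv track=rewrite | github.com/100472175/EDA | W15/Exercises/D&C1.py | findLowestEvenOdd
-- ===== SOURCE A (Python) =====
-- def findLowestEvenOdd(a):
--     if a is None or len(a) == 0:
--         return None, None
--
--     if len(a) == 1:
--         if a[0] % 2 == 0:
--             return a[0], None
--         else:
--             return None, a[0]
--
--     m = len(a) // 2
--     part1 = a[0:m]
--     part2 = a[m:]
--
--     even1, odd1 = findLowestEvenOdd(part1)
--     even2, odd2 = findLowestEvenOdd(part2)
--
--     if even1 is not None and even2 is not None:
--         even = min(even1, even2)
--     elif even1 is not None: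
--         even = even1
--     else:
--         even = even2
--
--     if odd1 is not None and odd2 is not None:
--         odd = min(odd1, odd2)
--     elif odd1 is not None:
--         odd = odd1
--     else:
--         odd = odd2
--
--     return even, odd
-- ===== SOURCE B (Python) =====
-- def findLowestEvenOdd(a):
--     if a is None or len(a) == 0:
--         return None, None
--     lowest_even = None
--     lowest_odd = None
--     for x in a:
--         if x % 2 == 0:
--             if lowest_even is None or x < lowest_even:
--                 lowest_even = x
--         else:
--             if lowest_odd is None or x < lowest_odd:
--                 lowest_odd = x
--     return lowest_even, lowest_odd
-- ===== Notes on version B (the rewrite author's own statement) =====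
-- stated objective: simpler
-- what changed: Replaces the divide-and-conquer recursion (halve the list, recurse on both halves, merge the two optional minima with an if-chain) by a single left-to-right loop maintaining lowest_even/lowest_odd with explicit conditional updates.
import Mathlib
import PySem

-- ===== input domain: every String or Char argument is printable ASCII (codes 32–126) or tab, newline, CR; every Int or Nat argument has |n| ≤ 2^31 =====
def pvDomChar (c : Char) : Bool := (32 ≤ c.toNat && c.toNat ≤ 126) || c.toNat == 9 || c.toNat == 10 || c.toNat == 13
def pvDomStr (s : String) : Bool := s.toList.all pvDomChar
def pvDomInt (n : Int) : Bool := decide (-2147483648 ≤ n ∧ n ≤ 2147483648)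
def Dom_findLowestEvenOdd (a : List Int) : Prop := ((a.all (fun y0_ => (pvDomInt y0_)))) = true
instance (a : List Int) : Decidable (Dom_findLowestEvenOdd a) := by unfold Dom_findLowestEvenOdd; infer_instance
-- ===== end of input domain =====

-- B replaces A's divide-and-conquer recursion by a single conditional-update loop (simpler; same results).

-- ===== PORT A =====
-- Literal port of A: halve the list, recurse on both halves, merge the optional minima
-- with A's if-chains (rendered as the matches below, branch for branch).
def findLowestEvenOdd (a : List Int) : Option Int × Option Int :=
  if _h0 : a.length = 0 then (none, none)
  else if _h1 : a.length = 1 then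
    -- a[0] on a nonempty list is a.headI
    if PySem.Int.mod a.headI 2 = 0 then (some a.headI, none) else (none, some a.headI)
  else
    let m : Nat := a.length / 2    -- len(a) // 2 (nonnegative, so Nat division is exact)
    let part1 := PySem.List.slice a (some 0) (some (m : Int))   -- a[0:m]
    let part2 := PySem.List.slice a (some (m : Int)) none       -- a[m:]
    let r1 := findLowestEvenOdd part1
    let r2 := findLowestEvenOdd part2
    -- if even1 is not None and even2 is not None: min(...); elif even1 is not None: even1; else: even2
    let even := match r1.1, r2.1 with
      | some e1, some e2 => some (min e1 e2)
      | some e1, none => some e1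
      | none, e2 => e2
    let odd := match r1.2, r2.2 with
      | some o1, some o2 => some (min o1 o2)
      | some o1, none => some o1
      | none, o2 => o2
    (even, odd)
termination_by a.length
decreasing_by
  · simp only [PySem.List.slice_zero_start, PySem.List.slice_to_natCast, List.length_take]
    omega
  · simp only [PySem.List.slice_from_natCast, List.length_drop]
    omega

-- ===== PORT B =====
-- one loop step of B: conditional update of (lowest_even, lowest_odd)
def altStep (st : Option Int × Option Int) (x : Int) : Option Int × Option Int :=
  if PySem.Int.mod x 2 = 0 then
    (match st.1 with
      | none => some x
      | some e => if x < e then some x else some e, st.2)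
  else
    (st.1,
     match st.2 with
      | none => some x
      | some o => if x < o then some x else some o)

def findLowestEvenOdd_alt (a : List Int) : Option Int × Option Int :=
  if a.length = 0 then (none, none)
  else a.foldl altStep (none, none)

-- ===== PRECONDITION & SPEC =====
def Spec_findLowestEvenOdd (a : List Int) (out : Option Int × Option Int) : Prop := out = findLowestEvenOdd_alt a
instance (a : List Int) (out : Option Int × Option Int) : Decidable (Spec_findLowestEvenOdd a out) := by unfold Spec_findLowestEvenOdd; infer_instance

-- ===== CLAIM (what is proved, stated in full; the proofs are below) =====
def Claim_equal_findLowestEvenOdd : Prop := ∀ (a : List Int), Dom_findLowestEvenOdd a → Spec_findLowestEvenOdd a (findLowestEvenOdd a)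

-- ===== LEMMAS AND PROOFS =====

-- A's merge of two optional minima, used to characterise both programs
def mergeMin : Option Int → Option Int → Option Int
  | some x, some y => some (min x y)
  | some x, none => some x
  | none, v => v

-- B's fold from the initial state (none, none)
def lows (l : List Int) : Option Int × Option Int := l.foldl altStep (none, none)

theorem mergeMin_none_right (u : Option Int) : mergeMin u none = u := by
  cases u <;> rfl

theorem mergeMin_none_left (v : Option Int) : mergeMin none v = v := rfl

theorem mergeMin_assoc (u v w : Option Int) :
    mergeMin (mergeMin u v) w = mergeMin u (mergeMin v w) := by
  cases u <;> cases v <;> cases w <;> simp [mergeMin, min_assoc]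

theorem altStep_fst (e o : Option Int) (x : Int) :
    (altStep (e, o) x).1 = if PySem.Int.mod x 2 = 0 then mergeMin e (some x) else e := by
  cases e <;> simp [altStep, mergeMin, min_def] <;> split_ifs <;> simp_all <;> omega

theorem altStep_snd (e o : Option Int) (x : Int) :
    (altStep (e, o) x).2 = if PySem.Int.mod x 2 = 0 then o else mergeMin o (some x) := by
  cases o <;> simp [altStep, mergeMin, min_def] <;> split_ifs <;> simp_all <;> omega

theorem foldl_merge (l : List Int) : ∀ e o : Option Int,
    l.foldl altStep (e, o) = (mergeMin e (lows l).1, mergeMin o (lows l).2) := by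
  induction l with
  | nil => intro e o; simp [lows, mergeMin_none_right]
  | cons x t ih =>
    intro e o
    have hx : lows (x :: t) = (mergeMin (altStep (none, none) x).1 (lows t).1,
        mergeMin (altStep (none, none) x).2 (lows t).2) := by
      simp only [lows, List.foldl_cons]
      rw [show altStep (none, none) x = ((altStep (none, none) x).1, (altStep (none, none) x).2) from rfl]
      exact ih _ _
    simp only [List.foldl_cons]
    rw [show altStep (e, o) x = ((altStep (e, o) x).1, (altStep (e, o) x).2) from rfl]
    rw [ih, hx]
    simp only [altStep_fst, altStep_snd]
    by_cases h : PySem.Int.mod x 2 = 0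
    · simp only [if_pos h, mergeMin_assoc, mergeMin_none_left]
    · simp only [if_neg h, mergeMin_assoc, mergeMin_none_left]

theorem lows_append (l1 l2 : List Int) :
    lows (l1 ++ l2) = (mergeMin (lows l1).1 (lows l2).1, mergeMin (lows l1).2 (lows l2).2) := by
  rw [show lows (l1 ++ l2) = List.foldl altStep (lows l1) l2 from by
    simp [lows, List.foldl_append]]
  rw [show (lows l1) = ((lows l1).1, (lows l1).2) from rfl]
  exact foldl_merge l2 _ _

theorem lows_singleton (x : Int) :
    lows [x] = if PySem.Int.mod x 2 = 0 then (some x, none) else (none, some x) := by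
  simp only [lows, List.foldl_cons, List.foldl_nil, altStep]

theorem A_eq_lows : ∀ (n : Nat) (a : List Int), a.length = n → findLowestEvenOdd a = lows a := by
  intro n
  induction n using Nat.strong_induction_on with
  | _ n ih =>
    intro a ha
    by_cases h0 : a.length = 0
    · have : a = [] := List.length_eq_zero_iff.mp h0
      subst this
      simp [findLowestEvenOdd, lows]
    · by_cases h1 : a.length = 1
      · obtain ⟨x, rfl⟩ := List.length_eq_one_iff.mp h1
        rw [findLowestEvenOdd, lows_singleton]
        simp [List.headI]
      · rw [findLowestEvenOdd]
        simp only [h0, h1, dite_false]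
        set m : Nat := a.length / 2 with hm
        have hp1 : PySem.List.slice a (some 0) (some (m : Int)) = a.take m := by
          simp [PySem.List.slice_zero_start, PySem.List.slice_to_natCast]
        have hp2 : PySem.List.slice a (some (m : Int)) none = a.drop m := by
          simp [PySem.List.slice_from_natCast]
        rw [hp1, hp2]
        have hlen1 : (a.take m).length < n := by simp [List.length_take]; omega
        have hlen2 : (a.drop m).length < n := by simp [List.length_drop]; omega
        rw [ih _ hlen1 _ rfl, ih _ hlen2 _ rfl]
        have := lows_append (a.take m) (a.drop m)
        rw [List.take_append_drop] at this
        rw [this]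
        cases h1 : (lows (a.take m)).1 <;> cases h2 : (lows (a.drop m)).1 <;>
          cases h3 : (lows (a.take m)).2 <;> cases h4 : (lows (a.drop m)).2 <;>
          simp [mergeMin]

-- ===== VERDICT (by name: the statement is the Claim_ definition above) =====
theorem findLowestEvenOdd_spec : Claim_equal_findLowestEvenOdd := by
  unfold Claim_equal_findLowestEvenOdd Spec_findLowestEvenOdd
  intro a _
  rw [A_eq_lows a.length a rfl]
  unfold findLowestEvenOdd_alt
  by_cases h0 : a.length = 0
  · have : a = [] := List.length_eq_zero_iff.mp h0
    subst this; simp [lows]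
  · simp [h0, lows]
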